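-- pv_equiv track=rewrite | github.com/johnbros/mlb | src/process_data.py | parse_info_array
-- ===== SOURCE A (Python) =====
-- def parse_info_array(info_array):
--     wind = None
--     weather = None
--     if info_array:
--         for info in info_array:
--             info_label = info.get('label')
--             if info_label == 'Weather':
--                 weather = info.get('value')
--             elif info_label == 'Wind':
--                 wind = info.get('value')
--     return wind, weather
-- ===== SOURCE B (Python) =====
-- def parse_info_array(info_array):
--     def last_value(label):
--         # last occurrence wins == first match scanning backwards (early exit)
--         for info in reversed(info_array or []):
--             if info.get('label') == label:
--                 return info.get('value')
--         return None
--     return last_value('Wind'), last_value('Weather')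
-- ===== Notes on version B (the rewrite author's own statement) =====
-- stated objective: alternative
-- what changed: Replaces A's single forward pass that keeps two accumulators with two early-exiting backward first-match searches (last occurrence wins = first match in reverse), one per label.
import Mathlib
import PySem

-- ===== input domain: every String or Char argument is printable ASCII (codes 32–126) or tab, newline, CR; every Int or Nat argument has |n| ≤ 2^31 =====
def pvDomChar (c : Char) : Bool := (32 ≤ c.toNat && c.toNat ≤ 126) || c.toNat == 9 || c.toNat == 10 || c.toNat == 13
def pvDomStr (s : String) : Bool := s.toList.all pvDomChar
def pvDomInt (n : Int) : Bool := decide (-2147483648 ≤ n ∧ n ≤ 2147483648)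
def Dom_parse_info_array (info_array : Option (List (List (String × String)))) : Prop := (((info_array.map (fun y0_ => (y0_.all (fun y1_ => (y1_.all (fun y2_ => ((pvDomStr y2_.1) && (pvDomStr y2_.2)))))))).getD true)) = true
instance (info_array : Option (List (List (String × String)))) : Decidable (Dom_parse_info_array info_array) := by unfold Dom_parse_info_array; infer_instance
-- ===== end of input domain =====

-- B replaces the forward two-accumulator pass by two early-exiting backward first-match searches (alternative decomposition; same cost).

-- ===== PORT A =====
def parse_info_array (info_array : Option (List (List (String × String)))) : Option String × Option String :=
  let wind : Option String := none
  let weather : Option String := none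
  match info_array with
  | none => (wind, weather)
  | some l =>
    if l = [] then (wind, weather)
    else
      l.foldl (fun (st : Option String × Option String) info =>
        let info_label := (PySem.Dict.mk info).get? "label"
        if info_label = some "Weather" then (st.1, (PySem.Dict.mk info).get? "value")
        else if info_label = some "Wind" then ((PySem.Dict.mk info).get? "value", st.2)
        else st) (wind, weather)

-- ===== PORT B =====
-- 'for info in reversed(...): if match: return info.get("value")' / 'return None'
def pvLastValue (label : String) : List (List (String × String)) → Option String
  | [] => none
  | info :: rest =>
    if (PySem.Dict.mk info).get? "label" = some label then (PySem.Dict.mk info).get? "value"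
    else pvLastValue label rest

def parse_info_array_alt (info_array : Option (List (List (String × String)))) : Option String × Option String :=
  let l := match info_array with | none => [] | some l => l   -- info_array or []
  (pvLastValue "Wind" l.reverse, pvLastValue "Weather" l.reverse)

-- ===== PRECONDITION & SPEC =====
def Spec_parse_info_array (info_array : Option (List (List (String × String)))) (out : Option String × Option String) : Prop := out = parse_info_array_alt info_array
instance (info_array : Option (List (List (String × String)))) (out : Option String × Option String) : Decidable (Spec_parse_info_array info_array out) := by unfold Spec_parse_info_array; infer_instance

-- ===== CLAIM (what is proved, stated in full; the proofs are below) =====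
def Claim_equal_parse_info_array : Prop := ∀ (info_array : Option (List (List (String × String)))), Dom_parse_info_array info_array → Spec_parse_info_array info_array (parse_info_array info_array)

-- ===== LEMMAS AND PROOFS =====

-- first-match result of the backward search, wrapped so "found value None" ≠ "not found"
def pvFind (label : String) : List (List (String × String)) → Option (Option String)
  | [] => none
  | info :: rest =>
    if (PySem.Dict.mk info).get? "label" = some label then some ((PySem.Dict.mk info).get? "value")
    else pvFind label rest

theorem pvLastValue_eq_find (label : String) (l : List (List (String × String))) :
    pvLastValue label l = (pvFind label l).getD none := by
  induction l with
  | nil => rfl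
  | cons i t ih =>
    simp only [pvLastValue, pvFind]
    split_ifs <;> simp [ih]

theorem pvFind_append (label : String) (a b : List (List (String × String))) :
    pvFind label (a ++ b) = (pvFind label a).or (pvFind label b) := by
  induction a with
  | nil => rfl
  | cons i t ih =>
    simp only [pvFind, List.cons_append]
    split_ifs <;> simp [ih]

-- A's forward fold from any start state equals the backward first-match (with the start as default)
theorem pv_fold_agree (l : List (List (String × String))) (st : Option String × Option String) :
    l.foldl (fun (st : Option String × Option String) info =>
        let info_label := (PySem.Dict.mk info).get? "label"
        if info_label = some "Weather" then (st.1, (PySem.Dict.mk info).get? "value")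
        else if info_label = some "Wind" then ((PySem.Dict.mk info).get? "value", st.2)
        else st) st
    = ((pvFind "Wind" l.reverse).getD st.1, (pvFind "Weather" l.reverse).getD st.2) := by
  induction l generalizing st with
  | nil => rfl
  | cons i t ih =>
    simp only [List.foldl_cons, List.reverse_cons]
    rw [ih]
    simp only [pvFind_append, pvFind]
    by_cases h1 : (PySem.Dict.mk i).get? "label" = some "Weather"
    · have h2 : ¬ (PySem.Dict.mk i).get? "label" = some "Wind" := by simp [h1]
      simp [h1, h2, Option.or]
      cases pvFind "Wind" t.reverse <;> cases pvFind "Weather" t.reverse <;> simp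
    · by_cases h2 : (PySem.Dict.mk i).get? "label" = some "Wind"
      · simp [h1, h2, Option.or]
        cases pvFind "Wind" t.reverse <;> cases pvFind "Weather" t.reverse <;> simp
      · simp [h1, h2, Option.or]
        cases pvFind "Wind" t.reverse <;> cases pvFind "Weather" t.reverse <;> simp

-- ===== VERDICT (by name: the statement is the Claim_ definition above) =====
theorem parse_info_array_spec : Claim_equal_parse_info_array := by
  intro info_array _
  unfold Spec_parse_info_array parse_info_array parse_info_array_alt
  match info_array with
  | none => rfl
  | some l =>
    by_cases h : l = []
    · simp [h, pvLastValue]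
    · simp only [h, if_false]
      rw [pv_fold_agree, pvLastValue_eq_find, pvLastValue_eq_find]
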